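-- pv_equiv track=rewrite | github.com/furixturi/deep-research-scratch | src/api/agent/single_agent.py | extract_react_components
-- ===== SOURCE A (Python) =====
-- def extract_react_components(response_content: str) -> dict:
--     """Extract Thought, Action, and Action Input from model response"""
--     if not response_content:
--         return {"thought": None, "action": None, "action_input": None}
--
--     lines = response_content.split("\n")
--     thought = None
--     action = None
--     action_input = None
--
--     for line in lines:
--         line = line.strip()
--         if not line:
--             continue
--
--         # Extract components based on ReAct format
--         if line.startswith("Thought:"):
--             thought = line  # Keep the full "Thought: ..." line
--         elif line.startswith("Action:"):
--             action = line  # Keep the full "Action: ..." line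
--         elif line.startswith("Action Input:"):
--             action_input = (
--                 line  # Keep the full "Action Input: ..." line
--             )
--         elif line.startswith("Final Answer:"):
--             # If we find Final Answer, that's the thought for this step
--             thought = line  # Keep the full "Final Answer: ..." line
--             action = None  # No action for final answer
--             action_input = None  # No action input for final answer
--             break
--
--     # If no explicit thought found, extract from first meaningful line
--     if not thought:
--         for line in lines:
--             line = line.strip()
--             if line and not line.startswith(
--                 ("Action:", "Action Input:", "Final Answer:")
--             ):
--                 thought = line
--                 break
--
--     return {
--         "thought": thought,
--         "action": action,
--         "action_input": action_input,
--     }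
-- ===== SOURCE B (Python) =====
-- def extract_react_components(response_content: str) -> dict:
--     stripped = [ln.strip() for ln in response_content.split("\n")]
--     # First Final Answer wins: it becomes the thought and clears action/input.
--     for ln in stripped:
--         if ln.startswith("Final Answer:"):
--             return {"thought": ln, "action": None, "action_input": None}
--     thought = action = action_input = None
--     for ln in stripped:
--         if ln.startswith("Thought:"):
--             thought = ln
--         elif ln.startswith("Action Input:"):
--             action_input = ln
--         elif ln.startswith("Action:"):
--             action = ln
--     if thought is None:
--         thought = next(
--             (ln for ln in stripped
--              if ln and not ln.startswith(("Action:", "Action Input:", "Final Answer:"))),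
--             None,
--         )
--     return {"thought": thought, "action": action, "action_input": action_input}
-- ===== Notes on version B (the rewrite author's own statement) =====
-- stated objective: alternative
-- what changed: Replaces A's single stateful elif-loop with break/reset and its separate fallback loop by a decomposition into three independent scans over the pre-stripped lines: an early-return find of the first final-answer line, one fold keeping the last occurrence of each of the three markers, and a find for the fallback thought.
import Mathlib
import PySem

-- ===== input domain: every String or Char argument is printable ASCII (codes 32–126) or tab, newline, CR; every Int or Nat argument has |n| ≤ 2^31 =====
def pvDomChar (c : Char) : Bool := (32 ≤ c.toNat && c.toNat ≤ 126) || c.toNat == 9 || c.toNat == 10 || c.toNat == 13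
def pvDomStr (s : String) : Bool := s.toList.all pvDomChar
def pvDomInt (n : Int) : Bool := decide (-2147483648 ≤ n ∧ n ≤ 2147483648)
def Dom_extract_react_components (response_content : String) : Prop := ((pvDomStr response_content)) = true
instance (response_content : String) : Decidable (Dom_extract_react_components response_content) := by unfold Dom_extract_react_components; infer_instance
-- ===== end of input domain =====

-- B replaces A's single stateful loop (with break/reset) by three independent scans over the
-- pre-stripped lines: an early-return find of the first final-answer line, one fold keeping the
-- last occurrence of each marker, and a find for the fallback thought; objective: alternative.

-- ===== PORT A =====
-- A's for-loop over lines: strip, skip empties, elif-chain, break on "Final Answer:".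
def pvALoop : List (List Char) → Option (List Char) → Option (List Char) → Option (List Char) →
    Option (List Char) × Option (List Char) × Option (List Char)
  | [], t, a, ai => (t, a, ai)
  | l :: rest, t, a, ai =>
    let line := PySem.Chars.strip l
    if line = [] then pvALoop rest t a ai
    else if PySem.Chars.startswith line "Thought:".toList then pvALoop rest (some line) a ai
    else if PySem.Chars.startswith line "Action:".toList then pvALoop rest t (some line) ai
    else if PySem.Chars.startswith line "Action Input:".toList then pvALoop rest t a (some line)
    else if PySem.Chars.startswith line "Final Answer:".toList then (some line, none, none)
    else pvALoop rest t a ai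

-- A's second loop: first stripped line that is non-empty and starts with none of the three prefixes.
def pvAFallback : List (List Char) → Option (List Char)
  | [] => none
  | l :: rest =>
    let line := PySem.Chars.strip l
    if line ≠ [] ∧ (PySem.Chars.startswith line "Action:".toList
        || PySem.Chars.startswith line "Action Input:".toList
        || PySem.Chars.startswith line "Final Answer:".toList) = false
    then some line else pvAFallback rest

def extract_react_components (response_content : String) : List (String × Option String) :=
  if response_content = "" then [("thought", none), ("action", none), ("action_input", none)]
  else
    let lines := PySem.Chars.splitOn response_content.toList "\n".toList
    let r := pvALoop lines none none none
    let t : Option (List Char) :=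
      match r.1 with
      | none => pvAFallback lines
      | some s => if s = [] then pvAFallback lines else some s  -- Python 'if not thought'
    [("thought", t.map String.ofList), ("action", r.2.1.map String.ofList),
     ("action_input", r.2.2.map String.ofList)]

-- ===== PORT B =====
-- one fold step keeping the LAST Thought:/Action:/Action Input: line
def pvBStep (st : Option (List Char) × Option (List Char) × Option (List Char)) (ln : List Char) :
    Option (List Char) × Option (List Char) × Option (List Char) :=
  if PySem.Chars.startswith ln "Thought:".toList then (some ln, st.2.1, st.2.2)
  else if PySem.Chars.startswith ln "Action Input:".toList then (st.1, st.2.1, some ln)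
  else if PySem.Chars.startswith ln "Action:".toList then (st.1, some ln, st.2.2)
  else st

def pvBFallbackPred (ln : List Char) : Bool :=
  !ln.isEmpty && !(PySem.Chars.startswith ln "Action:".toList
    || PySem.Chars.startswith ln "Action Input:".toList
    || PySem.Chars.startswith ln "Final Answer:".toList)

def extract_react_components_alt (response_content : String) : List (String × Option String) :=
  let stripped := (PySem.Chars.splitOn response_content.toList "\n".toList).map PySem.Chars.strip
  match stripped.find? (fun ln => PySem.Chars.startswith ln "Final Answer:".toList) with
  | some ln => [("thought", some (String.ofList ln)), ("action", none), ("action_input", none)]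
  | none =>
    let st := stripped.foldl pvBStep (none, none, none)
    let t : Option (List Char) :=
      match st.1 with
      | some s => some s
      | none => stripped.find? pvBFallbackPred
    [("thought", t.map String.ofList), ("action", st.2.1.map String.ofList),
     ("action_input", st.2.2.map String.ofList)]

-- ===== PRECONDITION & SPEC =====
def Spec_extract_react_components (response_content : String) (out : List (String × Option String)) : Prop := out = extract_react_components_alt response_content
instance (response_content : String) (out : List (String × Option String)) : Decidable (Spec_extract_react_components response_content out) := by unfold Spec_extract_react_components; infer_instance

-- ===== CLAIM (what is proved, stated in full; the proofs are below) =====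
def Claim_equal_extract_react_components : Prop := ∀ (response_content : String), Dom_extract_react_components response_content → Spec_extract_react_components response_content (extract_react_components response_content)

-- ===== LEMMAS AND PROOFS =====

-- two incomparable prefixes cannot both start the same string
theorem pv_excl {s p q : List Char} (hp : PySem.Chars.startswith s p = true)
    (h1 : ¬ p <+: q) (h2 : ¬ q <+: p) : PySem.Chars.startswith s q = false := by
  by_contra hq
  rw [Bool.not_eq_false, PySem.Chars.startswith_iff] at hq
  rw [PySem.Chars.startswith_iff] at hp
  rcases List.prefix_or_prefix_of_prefix hp hq with h | h
  · exact h1 h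
  · exact h2 h

theorem pv_sw_ne_nil {s : List Char} (h : PySem.Chars.startswith s "Thought:".toList = true) :
    s ≠ [] := by
  intro hnil; subst hnil; exact absurd h (by decide)

def pvThoughtOK (t : Option (List Char)) : Prop :=
  t = none ∨ ∃ s, t = some s ∧ PySem.Chars.startswith s "Thought:".toList = true

theorem pvFold_thought (S : List (List Char))
    (st : Option (List Char) × Option (List Char) × Option (List Char))
    (h : pvThoughtOK st.1) : pvThoughtOK (S.foldl pvBStep st).1 := by
  induction S generalizing st with
  | nil => exact h
  | cons s S ih =>
    simp only [List.foldl_cons]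
    apply ih
    unfold pvBStep
    split_ifs with h1 h2 h3
    · exact Or.inr ⟨s, rfl, h1⟩
    · exact h
    · exact h
    · exact h

theorem pvALoop_eq (L : List (List Char)) (t a ai : Option (List Char)) :
    pvALoop L t a ai =
      match (L.map PySem.Chars.strip).find?
          (fun ln => PySem.Chars.startswith ln "Final Answer:".toList) with
      | some fa => (some fa, none, none)
      | none => (L.map PySem.Chars.strip).foldl pvBStep (t, a, ai) := by
  induction L generalizing t a ai with
  | nil => rfl
  | cons l L ih =>
    simp only [List.map_cons, List.find?_cons, List.foldl_cons, pvALoop]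
    by_cases h0 : PySem.Chars.strip l = []
    · rw [h0]
      simp only [(by decide : PySem.Chars.startswith [] "Final Answer:".toList = false),
        pvBStep,
        (by decide : PySem.Chars.startswith [] "Thought:".toList = false),
        (by decide : PySem.Chars.startswith [] "Action Input:".toList = false),
        (by decide : PySem.Chars.startswith [] "Action:".toList = false),
        if_false, Bool.false_eq_true]
      exact ih t a ai
    · rw [if_neg h0]
      by_cases hT : PySem.Chars.startswith (PySem.Chars.strip l) "Thought:".toList = true
      · have hFA := pv_excl (q := "Final Answer:".toList) hT (by decide) (by decide)
        rw [if_pos hT, hFA]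
        simp only [pvBStep, if_pos hT]
        exact ih _ a ai
      · rw [if_neg hT]
        by_cases hA : PySem.Chars.startswith (PySem.Chars.strip l) "Action:".toList = true
        · have hFA := pv_excl (q := "Final Answer:".toList) hA (by decide) (by decide)
          have hAI := pv_excl (q := "Action Input:".toList) hA (by decide) (by decide)
          rw [if_pos hA, hFA]
          simp only [pvBStep, if_neg hT, hAI, Bool.false_eq_true, if_false, if_pos hA]
          exact ih t _ ai
        · rw [if_neg hA]
          by_cases hAI : PySem.Chars.startswith (PySem.Chars.strip l) "Action Input:".toList = true
          · have hFA := pv_excl (q := "Final Answer:".toList) hAI (by decide) (by decide)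
            rw [if_pos hAI, hFA]
            simp only [pvBStep, if_neg hT, if_pos hAI]
            exact ih t a _
          · rw [if_neg hAI]
            by_cases hFA : PySem.Chars.startswith (PySem.Chars.strip l) "Final Answer:".toList = true
            · rw [if_pos hFA, hFA]
            · rw [if_neg hFA]
              rw [Bool.not_eq_true] at hFA
              simp only [hFA, pvBStep, if_neg hT, if_neg hA, if_neg hAI]
              exact ih t a ai

theorem pvAFallback_eq (L : List (List Char)) :
    pvAFallback L = (L.map PySem.Chars.strip).find? pvBFallbackPred := by
  induction L with
  | nil => rfl
  | cons l L ih =>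
    simp only [List.map_cons, List.find?_cons, pvAFallback]
    by_cases h : pvBFallbackPred (PySem.Chars.strip l) = true
    · have h' : PySem.Chars.strip l ≠ [] ∧ (PySem.Chars.startswith (PySem.Chars.strip l) "Action:".toList
          || PySem.Chars.startswith (PySem.Chars.strip l) "Action Input:".toList
          || PySem.Chars.startswith (PySem.Chars.strip l) "Final Answer:".toList) = false := by
        simpa [pvBFallbackPred, List.isEmpty_iff, Bool.not_eq_true'] using h
      rw [if_pos h', h]
    · have h' : ¬ (PySem.Chars.strip l ≠ [] ∧ (PySem.Chars.startswith (PySem.Chars.strip l) "Action:".toList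
          || PySem.Chars.startswith (PySem.Chars.strip l) "Action Input:".toList
          || PySem.Chars.startswith (PySem.Chars.strip l) "Final Answer:".toList) = false) := by
        intro hc
        have h2 := hc.2
        simp only [Bool.or_eq_false_iff] at h2
        refine h ?_
        simp [pvBFallbackPred, hc.1]
        exact ⟨⟨h2.1.1, h2.1.2⟩, h2.2⟩
      rw [if_neg h', Bool.not_eq_true] at *
      rw [h]
      exact ih

-- ===== VERDICT (by name: the statement is the Claim_ definition above) =====
theorem extract_react_components_spec : Claim_equal_extract_react_components := by
  intro rc _
  unfold Spec_extract_react_components extract_react_components extract_react_components_alt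
  by_cases h : rc = ""
  · subst h; decide
  · simp only [if_neg h, pvALoop_eq, pvAFallback_eq]
    cases hfa : ((PySem.Chars.splitOn rc.toList "\n".toList).map PySem.Chars.strip).find?
        (fun ln => PySem.Chars.startswith ln "Final Answer:".toList) with
    | some fa =>
      have hpred : PySem.Chars.startswith fa "Final Answer:".toList = true := by
        simpa using List.find?_some hfa
      have hne : fa ≠ [] := by intro h0; subst h0; exact absurd hpred (by decide)
      simp [hne]
    | none =>
      simp only []
      have hinv := pvFold_thought ((PySem.Chars.splitOn rc.toList "\n".toList).map PySem.Chars.strip)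
        (none, none, none) (Or.inl rfl)
      rcases hinv with hn | ⟨s, hs, hsw⟩
      · rw [hn]
      · rw [hs]
        simp [pv_sw_ne_nil hsw]
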